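-- pv_equiv track=rewrite | github.com/hyunjee-k/algorithm | dp/pro258705.py | solution
-- ===== SOURCE A (Python) =====
-- def solution(n, tops):
--     # 우측 하단을 공유하는 경우
--     share = [0] * n
--     # 우측 하단을 공유하지 않는 경우
--     not_share = [0] * n
--
--     if tops[0] == 1:
--         share[0] = 4
--         not_share[0] = 3
--     else:
--         share[0] = 3
--         not_share[0] = 2
--
--     for i in range(1, n):
--         if tops[i] == 1:
--             share[i] = (share[i-1] * 3 + not_share[i-1]) % 10007
--             not_share[i] = (share[i-1] * 2 + not_share[i-1]) % 10007
--         else: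
--             share[i] = (share[i-1] * 2 + not_share[i-1]) % 10007
--             not_share[i] = (share[i-1] * 1 + not_share[i-1]) % 10007
--
--     return share[-1]
-- ===== SOURCE B (Python) =====
-- def solution(n, tops):
--     # Rolling second-order recurrence: not_share[i] == share[i] - share[i-1] (mod 10007),
--     # so share[i] = (4 if tops[i]==1 else 3) * share[i-1] - share[i-2] (mod 10007),
--     # with a virtual share[-1] = 1. Only two scalars are kept; no arrays.
--     MOD = 10007
--     prev2 = 1
--     prev1 = 4 if tops[0] == 1 else 3
--     for i in range(1, n):
--         c = 4 if tops[i] == 1 else 3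
--         prev2, prev1 = prev1, (c * prev1 - prev2) % MOD
--     return prev1
-- ===== Notes on version B (the rewrite author's own statement) =====
-- stated objective: simpler
-- what changed: Eliminates the not_share state and both length-n arrays via the identity not_share[i] = share[i] - share[i-1] (mod 10007), collapsing the two coupled first-order recurrences into one second-order rolling recurrence over two scalars.
import Mathlib
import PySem

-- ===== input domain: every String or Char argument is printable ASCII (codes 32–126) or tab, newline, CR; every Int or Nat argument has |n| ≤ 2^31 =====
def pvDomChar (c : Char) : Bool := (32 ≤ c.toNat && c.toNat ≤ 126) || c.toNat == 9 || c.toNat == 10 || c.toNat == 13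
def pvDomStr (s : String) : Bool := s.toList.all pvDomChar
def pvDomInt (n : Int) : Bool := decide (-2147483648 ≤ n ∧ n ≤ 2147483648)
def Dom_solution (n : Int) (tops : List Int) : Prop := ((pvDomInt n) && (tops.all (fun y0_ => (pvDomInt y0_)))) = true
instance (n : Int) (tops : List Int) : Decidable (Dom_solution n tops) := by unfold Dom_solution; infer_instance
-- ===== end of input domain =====

-- B replaces A's two coupled length-n DP arrays by a single second-order rolling
-- recurrence over two scalars (objective: simpler, O(1) space).

-- ===== PORT A =====
-- loop body: the two sequential assignments of A's for-loop (the second reads the updated share list)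
def solutionBody (tops : List Int) (st : List Int × List Int) (i : Int) : List Int × List Int :=
  let share := st.1
  let not_share := st.2
  if PySem.List.pyGetD tops i 0 = 1 then
    let share' := PySem.List.pySetD share i
      (PySem.Int.mod (PySem.List.pyGetD share (i-1) 0 * 3 + PySem.List.pyGetD not_share (i-1) 0) 10007)
    let not_share' := PySem.List.pySetD not_share i
      (PySem.Int.mod (PySem.List.pyGetD share' (i-1) 0 * 2 + PySem.List.pyGetD not_share (i-1) 0) 10007)
    (share', not_share')
  else
    let share' := PySem.List.pySetD share i
      (PySem.Int.mod (PySem.List.pyGetD share (i-1) 0 * 2 + PySem.List.pyGetD not_share (i-1) 0) 10007)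
    let not_share' := PySem.List.pySetD not_share i
      (PySem.Int.mod (PySem.List.pyGetD share' (i-1) 0 * 1 + PySem.List.pyGetD not_share (i-1) 0) 10007)
    (share', not_share')

-- the state after the initial assignments to share[0] / not_share[0]
def solutionInit (n : Int) (tops : List Int) : List Int × List Int :=
  let share0 := PySem.List.pyRepeat [(0:Int)] n
  let not_share0 := PySem.List.pyRepeat [(0:Int)] n
  if PySem.List.pyGetD tops 0 0 = 1 then
    (PySem.List.pySetD share0 0 4, PySem.List.pySetD not_share0 0 3)
  else
    (PySem.List.pySetD share0 0 3, PySem.List.pySetD not_share0 0 2)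

def solution (n : Int) (tops : List Int) : Int :=
  let st := (PySem.List.pyRange 1 n 1).foldl (solutionBody tops) (solutionInit n tops)
  PySem.List.pyGetD st.1 (-1) 0

-- ===== PORT B =====
def solutionAltBody (tops : List Int) (pr : Int × Int) (i : Int) : Int × Int :=
  let c : Int := if PySem.List.pyGetD tops i 0 = 1 then 4 else 3
  (pr.2, PySem.Int.mod (c * pr.2 - pr.1) 10007)

def solution_alt (n : Int) (tops : List Int) : Int :=
  let p1 : Int := if PySem.List.pyGetD tops 0 0 = 1 then 4 else 3
  ((PySem.List.pyRange 1 n 1).foldl (solutionAltBody tops) ((1 : Int), p1)).2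

-- ===== PRECONDITION & SPEC =====
-- Pre excludes exactly the inputs where A raises an IndexError: n < 1 (share[0]/share[-1]
-- on an empty or too-short list) or len(tops) < n (tops[i] out of range).
def Pre_solution (n : Int) (tops : List Int) : Prop := 1 ≤ n ∧ n ≤ (tops.length : Int)
instance (n : Int) (tops : List Int) : Decidable (Pre_solution n tops) := by
  unfold Pre_solution; infer_instance

def pvWitness_solution : Int × List Int := (3, [1, 0, 1])

def Spec_solution (n : Int) (tops : List Int) (out : Int) : Prop := out = solution_alt n tops
instance (n : Int) (tops : List Int) (out : Int) : Decidable (Spec_solution n tops out) := by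
  unfold Spec_solution; infer_instance

-- ===== CLAIM (what is proved, stated in full; the proofs are below) =====
def Claim_equal_solution : Prop := ∀ (n : Int) (tops : List Int), Dom_solution n tops → Pre_solution n tops → Spec_solution n tops (solution n tops)

-- ===== LEMMAS AND PROOFS =====

-- Invariant: after processing range(1, k), A's lists keep length n, A's share[k-1] is B's
-- prev1, and A's not_share[k-1] ≡ prev1 - prev2 (mod 10007).
theorem solution_inv (n : Int) (tops : List Int) :
    ∀ k : Int, 1 ≤ k → k ≤ n →
      ((PySem.List.pyRange 1 k 1).foldl (solutionBody tops) (solutionInit n tops)).1.length = n.toNat ∧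
      ((PySem.List.pyRange 1 k 1).foldl (solutionBody tops) (solutionInit n tops)).2.length = n.toNat ∧
      PySem.List.pyGetD ((PySem.List.pyRange 1 k 1).foldl (solutionBody tops) (solutionInit n tops)).1 (k-1) 0
        = ((PySem.List.pyRange 1 k 1).foldl (solutionAltBody tops) ((1 : Int), if PySem.List.pyGetD tops 0 0 = 1 then 4 else 3)).2 ∧
      PySem.List.pyGetD ((PySem.List.pyRange 1 k 1).foldl (solutionBody tops) (solutionInit n tops)).2 (k-1) 0 % 10007
        = (((PySem.List.pyRange 1 k 1).foldl (solutionAltBody tops) ((1 : Int), if PySem.List.pyGetD tops 0 0 = 1 then 4 else 3)).2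
           - ((PySem.List.pyRange 1 k 1).foldl (solutionAltBody tops) ((1 : Int), if PySem.List.pyGetD tops 0 0 = 1 then 4 else 3)).1) % 10007 := by
  intro k hk
  induction k, hk using Int.le_induction with
  | base =>
    intro hn
    rw [PySem.List.pyRange_one_eq_nil (by omega)]
    simp only [List.foldl_nil]
    have hrep : PySem.List.pyRepeat [(0:Int)] n = List.replicate n.toNat 0 :=
      PySem.List.pyRepeat_singleton 0 n
    obtain ⟨m, hm⟩ : ∃ m, n.toNat = m + 1 := ⟨n.toNat - 1, by omega⟩
    unfold solutionInit
    simp only [hrep, hm, List.replicate_succ]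
    split <;>
      simp [PySem.List.pySetD_of_nonneg, PySem.List.pyGetD_zero_cons]
  | succ k hk1 ih =>
    intro hn
    have hkn : k ≤ n := by omega
    obtain ⟨hl1, hl2, hs, hns⟩ := ih hkn
    rw [PySem.List.pyRange_one_succ_right (by omega)]
    simp only [List.foldl_append, List.foldl_cons, List.foldl_nil]
    set A := (PySem.List.pyRange 1 k 1).foldl (solutionBody tops) (solutionInit n tops) with hA
    set B := (PySem.List.pyRange 1 k 1).foldl (solutionAltBody tops)
      ((1 : Int), if PySem.List.pyGetD tops 0 0 = 1 then 4 else 3) with hB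
    have hlt : k.toNat < n.toNat := by omega
    have hk1n : (k-1).toNat < n.toNat := by omega
    have hne : (k-1).toNat ≠ k.toNat := by omega
    have hset : ∀ (xs : List Int) (v : Int), PySem.List.pySetD xs k v = xs.set k.toNat v :=
      fun xs v => PySem.List.pySetD_of_nonneg xs v (by omega)
    have hmod : ∀ a : Int, PySem.Int.mod a 10007 = a % 10007 := fun a =>
      PySem.Int.mod_eq_emod_of_pos (by norm_num)
    -- reading index k-1 after setting index k is unchanged
    have hget_set : ∀ (xs : List Int) (v : Int), xs.length = n.toNat →
        PySem.List.pyGetD (PySem.List.pySetD xs k v) (k-1) 0 = PySem.List.pyGetD xs (k-1) 0 := by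
      intro xs v hlen
      rw [hset xs v]
      rw [PySem.List.pyGetD_eq_getElem _ 0 (by omega) (by simp [hlen]; omega)]
      rw [PySem.List.pyGetD_eq_getElem xs 0 (by omega) (by rw [hlen]; omega)]
      exact List.getElem_set_ne (Ne.symm hne) _
    -- reading index k after setting index k yields the new value
    have hget_set_self : ∀ (xs : List Int) (v : Int), xs.length = n.toNat →
        PySem.List.pyGetD (PySem.List.pySetD xs k v) k 0 = v := by
      intro xs v hlen
      rw [hset xs v]
      rw [PySem.List.pyGetD_eq_getElem _ 0 (by omega) (by simp [hlen]; omega)]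
      exact List.getElem_set_self (by simpa [hlen] using hlt)
    unfold solutionBody solutionAltBody
    simp only []
    split
    case isTrue ht =>
      refine ⟨?_, ?_, ?_, ?_⟩
      · simp [hset, hl1]
      · simp [hset, hl2]
      · show PySem.List.pyGetD (PySem.List.pySetD A.1 k _) (k + 1 - 1) 0 = _
        have : k + 1 - 1 = k := by ring
        rw [this, hget_set_self A.1 _ hl1, hmod, hmod, hs]
        omega
      · show PySem.List.pyGetD (PySem.List.pySetD A.2 k _) (k + 1 - 1) 0 % 10007 = _
        have h11 : k + 1 - 1 = k := by ring
        rw [h11, hget_set_self A.2 _ hl2, hget_set A.1 _ hl1]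
        simp only [hmod, hs]
        omega
    case isFalse ht =>
      refine ⟨?_, ?_, ?_, ?_⟩
      · simp [hset, hl1]
      · simp [hset, hl2]
      · show PySem.List.pyGetD (PySem.List.pySetD A.1 k _) (k + 1 - 1) 0 = _
        have : k + 1 - 1 = k := by ring
        rw [this, hget_set_self A.1 _ hl1, hmod, hmod, hs]
        omega
      · show PySem.List.pyGetD (PySem.List.pySetD A.2 k _) (k + 1 - 1) 0 % 10007 = _
        have h11 : k + 1 - 1 = k := by ring
        rw [h11, hget_set_self A.2 _ hl2, hget_set A.1 _ hl1]
        simp only [hmod, hs]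
        omega

-- ===== VERDICT (by name: the statement is the Claim_ definition above) =====
theorem solution_spec : Claim_equal_solution := by
  intro n tops _ hpre
  obtain ⟨hn, hlen⟩ := hpre
  obtain ⟨hl1, _, hs, _⟩ := solution_inv n tops n hn le_rfl
  unfold Spec_solution solution solution_alt
  simp only []
  set A := (PySem.List.pyRange 1 n 1).foldl (solutionBody tops) (solutionInit n tops) with hA
  have hne : A.1 ≠ [] := by
    intro h
    rw [h] at hl1
    simp at hl1
    omega
  rw [← hs]
  rw [PySem.List.pyGetD_eq_getElem A.1 0 (show (0:Int) ≤ n - 1 by omega)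
    (by rw [hl1]; omega)]
  rw [PySem.List.pyGetD_neg_ofNat A.1 1 0 (by omega) (by rw [hl1]; omega)]
  have hidx : A.1.length - 1 = (n-1).toNat := by rw [hl1]; omega
  simp [hidx]
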